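-- pv_equiv track=rewrite | github.com/stheil15/virAnnot | tools/blast2hist.py | _get_cumul_matrix
-- ===== SOURCE A (Python) =====
-- def _get_cumul_matrix (matrix):
-- 	cumul = []
-- 	for i in range(0,len(matrix)):
-- 		if i == 0:
-- 			cumul.append(matrix[i])
-- 		else:
-- 			cumul.append([])
-- 			for j in range(0,len(matrix[i])):
-- 				cumul[i].append(matrix[i][j] + cumul[i-1][j])
-- 	return cumul
-- ===== SOURCE B (Python) =====
-- def _get_cumul_matrix(matrix):
--     # Structural recursion carrying the previous cumulative row; elementwise
--     # sums via zip instead of indexed loops.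
--     def go(prev, rest):
--         if not rest:
--             return []
--         cur = [a + b for a, b in zip(rest[0], prev)]
--         return [cur] + go(cur, rest[1:])
--     if not matrix:
--         return []
--     return [matrix[0]] + go(matrix[0], matrix[1:])
-- ===== Notes on version B (the rewrite author's own statement) =====
-- stated objective: simpler
-- what changed: Replaces the index-based double loop (range(len(...)), cumul[i-1][j]) by a structural recursion that carries the previous cumulative row and sums rows elementwise with zip; Pre_ excludes the ragged matrices (a row longer than its predecessor) on which A raises IndexError.
import Mathlib
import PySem

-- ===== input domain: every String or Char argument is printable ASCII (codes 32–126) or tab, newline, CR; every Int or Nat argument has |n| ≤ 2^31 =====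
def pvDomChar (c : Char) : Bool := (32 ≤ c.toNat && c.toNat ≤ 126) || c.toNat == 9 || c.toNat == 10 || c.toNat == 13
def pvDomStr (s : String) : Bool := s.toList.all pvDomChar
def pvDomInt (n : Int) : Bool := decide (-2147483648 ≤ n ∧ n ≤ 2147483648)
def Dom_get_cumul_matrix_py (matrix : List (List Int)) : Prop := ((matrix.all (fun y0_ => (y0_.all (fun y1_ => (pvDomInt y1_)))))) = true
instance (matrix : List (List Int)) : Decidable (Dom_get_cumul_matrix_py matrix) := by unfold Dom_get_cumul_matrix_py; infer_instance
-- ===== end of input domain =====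

-- B replaces A's index-based double loop by a structural recursion carrying the
-- previous cumulative row, summing rows elementwise (objective: simpler).

-- ===== PORT A =====
def get_cumul_matrix_py (matrix : List (List Int)) : List (List Int) :=
  (PySem.List.pyRange 0 (PySem.List.len matrix) 1).foldl (fun cumul i =>
    if i = 0 then
      cumul ++ [PySem.List.pyGetD matrix i []]
    else
      -- Python appends [] and then fills cumul[i] in place; equivalently the
      -- finished row is appended once the inner loop over j is done.
      cumul ++ [(PySem.List.pyRange 0 (PySem.List.len (PySem.List.pyGetD matrix i [])) 1).foldl
        (fun r j => r ++ [PySem.List.pyGetD (PySem.List.pyGetD matrix i []) j 0 +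
                          PySem.List.pyGetD (PySem.List.pyGetD cumul (i - 1) []) j 0]) []]) []

-- ===== PORT B =====
def pvAltGo (prev : List Int) (rest : List (List Int)) : List (List Int) :=
  match rest with
  | [] => []
  | r :: rs =>
    let cur := List.zipWith (fun a b => a + b) r prev
    cur :: pvAltGo cur rs

def get_cumul_matrix_py_alt (matrix : List (List Int)) : List (List Int) :=
  match matrix with
  | [] => []
  | r :: rs => r :: pvAltGo r rs

-- ===== PRECONDITION & SPEC =====
-- Pre_ excludes exactly the ragged matrices on which A raises IndexError
-- (a row longer than its predecessor): adjacent row lengths must be nonincreasing.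
def Pre_get_cumul_matrix_py (matrix : List (List Int)) : Prop :=
  List.IsChain (fun a b : List Int => b.length ≤ a.length) matrix

instance (matrix : List (List Int)) : Decidable (Pre_get_cumul_matrix_py matrix) := by
  unfold Pre_get_cumul_matrix_py; infer_instance

def pvWitness_get_cumul_matrix_py : List (List Int) := [[1, 2, 3], [4, 5, 6], [7, 8]]

def Spec_get_cumul_matrix_py (matrix : List (List Int)) (out : List (List Int)) : Prop :=
  out = get_cumul_matrix_py_alt matrix
instance (matrix : List (List Int)) (out : List (List Int)) : Decidable (Spec_get_cumul_matrix_py matrix out) := by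
  unfold Spec_get_cumul_matrix_py; infer_instance

-- ===== CLAIM (what is proved, stated in full; the proofs are below) =====
def Claim_equal_get_cumul_matrix_py : Prop := ∀ (matrix : List (List Int)), Dom_get_cumul_matrix_py matrix → Pre_get_cumul_matrix_py matrix → Spec_get_cumul_matrix_py matrix (get_cumul_matrix_py matrix)

-- ===== LEMMAS AND PROOFS =====

lemma getLastD_cons' {α : Type} (a : α) (l : List α) (d : α) :
    (a :: l).getLastD d = l.getLastD a := by
  cases l <;> rfl

lemma getLastD_of_ne_nil {α : Type} (l : List α) (h : l ≠ []) (d : α) :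
    l.getLastD d = l.getLast h := by
  induction l generalizing d with
  | nil => simp at h
  | cons a t ih =>
    rcases t with _ | ⟨b, t'⟩
    · rfl
    · rw [getLastD_cons', ih (by simp)]
      exact (List.getLast_cons (by simp)).symm

lemma getLastD_map {α β : Type} (f : α → β) (l : List α) (d : α) :
    (l.map f).getLastD (f d) = f (l.getLastD d) := by
  induction l generalizing d with
  | nil => rfl
  | cons a t ih => rw [List.map_cons, getLastD_cons', getLastD_cons', ih]

lemma pvAltGo_snoc (prev : List Int) (xs : List (List Int)) (r : List Int) :
    pvAltGo prev (xs ++ [r]) =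
      pvAltGo prev xs ++ [List.zipWith (fun a b => a + b) r ((pvAltGo prev xs).getLastD prev)] := by
  induction xs generalizing prev with
  | nil => simp [pvAltGo]
  | cons x t ih =>
    simp only [List.cons_append, pvAltGo, ih, getLastD_cons']

lemma pvAltGo_length (prev : List Int) (xs : List (List Int)) :
    (pvAltGo prev xs).length = xs.length := by
  induction xs generalizing prev with
  | nil => rfl
  | cons x t ih => simp [pvAltGo, ih]

lemma pvAltGo_row_lengths (prev : List Int) (xs : List (List Int))
    (h : List.IsChain (fun a b : List Int => b.length ≤ a.length) (prev :: xs)) :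
    (pvAltGo prev xs).map List.length = xs.map List.length := by
  induction xs generalizing prev with
  | nil => rfl
  | cons x t ih =>
    have hx : x.length ≤ prev.length := (List.isChain_cons_cons.mp h).1
    have hcur : (List.zipWith (fun a b : Int => a + b) x prev).length = x.length := by
      simp [List.length_zipWith]; omega
    have ht : List.IsChain (fun a b : List Int => b.length ≤ a.length)
        ((List.zipWith (fun a b : Int => a + b) x prev) :: t) := by
      rcases t with _ | ⟨y, t'⟩
      · exact List.isChain_singleton _
      · have h2 := (List.isChain_cons_cons.mp h).2
        have hy : y.length ≤ x.length := (List.isChain_cons_cons.mp h2).1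
        exact List.isChain_cons_cons.mpr ⟨by omega, (List.isChain_cons_cons.mp h2).2⟩
    simpa [pvAltGo, hcur] using ih _ ht

-- the inner j-loop of A is exactly zipWith (+) when row is no longer than prev
lemma inner_loop_eq_zipWith (row prev : List Int) (h : row.length ≤ prev.length) :
    (PySem.List.pyRange 0 (PySem.List.len row) 1).foldl
      (fun r j => r ++ [PySem.List.pyGetD row j 0 + PySem.List.pyGetD prev j 0]) []
      = List.zipWith (fun a b => a + b) row prev := by
  rw [PySem.List.foldl_append_singleton_eq_map]
  simp only [List.nil_append]
  apply List.ext_getElem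
  · simp [PySem.List.length_pyRange_one, PySem.List.len, List.length_zipWith]; omega
  · intro k hk1 hk2
    have hkr : k < row.length := by
      simpa [PySem.List.length_pyRange_one, PySem.List.len] using hk1
    have hkp : k < prev.length := by omega
    rw [List.getElem_map]
    rw [PySem.List.getElem_pyRange_one]
    simp only [zero_add]
    rw [show ((k : Int)) = ((k : Nat) : Int) by simp]
    rw [PySem.List.pyGetD_natCast, PySem.List.pyGetD_natCast]
    simp [List.getD_eq_getElem?_getD, hkr, hkp]

lemma getD_last (xs : List (List Int)) (hne : xs ≠ []) (d : List Int) :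
    xs.getD (xs.length - 1) d = xs.getLastD d := by
  rw [getLastD_of_ne_nil xs hne d]
  have hlt : xs.length - 1 < xs.length := by
    rcases xs with _ | _
    · simp at hne
    · simp
  rw [List.getD_eq_getElem _ _ hlt, List.getLast_eq_getElem]

-- main invariant: the outer fold over the first k indices produces B's value on the first k rows
lemma outer_invariant (matrix : List (List Int))
    (hch : Pre_get_cumul_matrix_py matrix) (k : Nat) (hk : k ≤ matrix.length) :
    (PySem.List.pyRange 0 (k : Int) 1).foldl (fun cumul i =>
      if i = 0 then
        cumul ++ [PySem.List.pyGetD matrix i []]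
      else
        cumul ++ [(PySem.List.pyRange 0 (PySem.List.len (PySem.List.pyGetD matrix i [])) 1).foldl
          (fun r j => r ++ [PySem.List.pyGetD (PySem.List.pyGetD matrix i []) j 0 +
                            PySem.List.pyGetD (PySem.List.pyGetD cumul (i - 1) []) j 0]) []]) []
      = get_cumul_matrix_py_alt (matrix.take k) := by
  induction k with
  | zero => simp [PySem.List.pyRange_one_eq_nil, get_cumul_matrix_py_alt]
  | succ k ih =>
    have hk' : k ≤ matrix.length := Nat.le_of_succ_le hk
    have hklt : k < matrix.length := hk
    rw [show ((Nat.succ k : Nat) : Int) = (k : Int) + 1 by push_cast; ring,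
        PySem.List.pyRange_one_succ_right (by positivity), List.foldl_append, ih hk']
    rcases matrix with _ | ⟨m0, rest⟩
    · simp at hklt
    rcases Nat.eq_zero_or_pos k with hk0 | hkpos
    · subst hk0
      simp [get_cumul_matrix_py_alt, List.foldl, PySem.List.pyGetD, pvAltGo]
    · -- k ≥ 1 : the row index is nonzero
      have hne : ((k : Int)) ≠ 0 := by exact_mod_cast Nat.pos_iff_ne_zero.mp hkpos
      simp only [List.foldl_cons, List.foldl_nil, if_neg hne]
      set M : List (List Int) := m0 :: rest with hM
      have htake : M.take (k + 1) = M.take k ++ [M[k]] := by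
        rw [List.take_add_one, List.getElem?_eq_getElem hklt]; rfl
      have hrow : PySem.List.pyGetD M (k : Int) [] = M[k] := by
        rw [PySem.List.pyGetD_natCast, List.getD_eq_getElem _ _ hklt]
      obtain ⟨t, ht⟩ : ∃ t, M.take k = m0 :: t := by
        exact ⟨rest.take (k - 1), by
          rw [hM]; cases k with
          | zero => omega
          | succ k' => simp [List.take_succ_cons]⟩
      have halt_take : get_cumul_matrix_py_alt (M.take k) = m0 :: pvAltGo m0 t := by
        rw [ht]; rfl
      have hlen_t : t.length = k - 1 := by
        have := congrArg List.length ht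
        simp at this; omega
      have hlen_take : (get_cumul_matrix_py_alt (M.take k)).length = k := by
        rw [halt_take]
        simp [pvAltGo_length, hlen_t]; omega
      -- the previous cumulative row is the last one built so far
      have hprev : PySem.List.pyGetD (get_cumul_matrix_py_alt (M.take k)) ((k : Int) - 1) []
          = (get_cumul_matrix_py_alt (M.take k)).getLastD [] := by
        rw [show ((k : Int) - 1) = (((k - 1 : Nat)) : Int) by omega, PySem.List.pyGetD_natCast]
        rw [show (k - 1 : Nat) = (get_cumul_matrix_py_alt (M.take k)).length - 1 by omega]
        exact getD_last _ (by rw [halt_take]; simp) _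
      have hchain_take : List.IsChain (fun a b : List Int => b.length ≤ a.length) (M.take k) :=
        hch.take k
      have hrowlens : (pvAltGo m0 t).map List.length = t.map List.length := by
        apply pvAltGo_row_lengths
        rw [← ht]; exact hchain_take
      -- its length bounds the next row's length (the chain condition)
      have hlastlen : M[k].length ≤ ((get_cumul_matrix_py_alt (M.take k)).getLastD []).length := by
        have hlast_mat : (M.take k).getLastD [] = M[k - 1]'(by omega) := by
          rw [getLastD_of_ne_nil _ (by rw [ht]; simp), List.getLast_eq_getElem]
          have hlk : (M.take k).length = k := by simp [List.length_take]; omega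
          simp only [hlk]
          rw [List.getElem_take]
        have hchlink : M[k].length ≤ (M[k - 1]'(by omega)).length := by
          have := List.isChain_iff_getElem.mp hch (k - 1) (by omega)
          simpa [show k - 1 + 1 = k by omega] using this
        have hlastcum : ((get_cumul_matrix_py_alt (M.take k)).getLastD []).length
            = ((M.take k).getLastD []).length := by
          rw [halt_take, ht, getLastD_cons', getLastD_cons']
          rw [← getLastD_map List.length (pvAltGo m0 t) m0,
              ← getLastD_map List.length t m0, hrowlens]
        rw [hlastcum, hlast_mat]
        exact hchlink
      rw [hrow, hprev, inner_loop_eq_zipWith _ _ hlastlen, htake, ht]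
      simp only [get_cumul_matrix_py_alt, List.cons_append]
      rw [pvAltGo_snoc, getLastD_cons']

-- ===== VERDICT (by name: the statement is the Claim_ definition above) =====
theorem get_cumul_matrix_py_spec : Claim_equal_get_cumul_matrix_py := by
  intro matrix _ hpre
  show get_cumul_matrix_py matrix = get_cumul_matrix_py_alt matrix
  unfold get_cumul_matrix_py
  have := outer_invariant matrix hpre matrix.length le_rfl
  simpa [PySem.List.len] using this
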